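-- pv_equiv track=rewrite | github.com/ShamsAnsari/KattisSolutions | parsinghex.py | getHex
-- ===== SOURCE A (Python) =====
-- def isHexNum(char):
--     if not(char.isalnum() or char.isdigit()):
--         return False
--     n = ord(char)
--     return (48 <= n <= 57) or (65 <= n <= 70) or (97 <= n <= 102)
--
-- def getHex(line, i):
--     hex = line[i: i + 2]
--     index = i + 2
--     for j in range(8):
--         if i + j + 2 >= len(line):
--             break
--         if isHexNum(line[i + j + 2]):
--             index += 1
--             hex += line[i + j + 2]
--         else:
--             break
--     return hex, index
-- ===== SOURCE B (Python) =====
-- _HEX = '0123456789abcdefABCDEF'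
--
-- def getHex(line, i):
--     chunk = line[i + 2 : i + 10]
--     count = len(chunk) - len(chunk.lstrip(_HEX))
--     end = i + 2 + count
--     return line[i:end], end
-- ===== Notes on version B (the rewrite author's own statement) =====
-- stated objective: idiomatic
-- what changed: Replaces A's char-by-char accumulation loop (string concatenation plus an index counter) with a loop-free computation: measure the hex-digit run by lstrip-ing an 8-char slice and cut the whole token out with one slice.
-- outside the precondition, e.g. on getHex('abc', -1): A returns ('bc', 3), B returns ('c', 3)
import Mathlib
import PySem

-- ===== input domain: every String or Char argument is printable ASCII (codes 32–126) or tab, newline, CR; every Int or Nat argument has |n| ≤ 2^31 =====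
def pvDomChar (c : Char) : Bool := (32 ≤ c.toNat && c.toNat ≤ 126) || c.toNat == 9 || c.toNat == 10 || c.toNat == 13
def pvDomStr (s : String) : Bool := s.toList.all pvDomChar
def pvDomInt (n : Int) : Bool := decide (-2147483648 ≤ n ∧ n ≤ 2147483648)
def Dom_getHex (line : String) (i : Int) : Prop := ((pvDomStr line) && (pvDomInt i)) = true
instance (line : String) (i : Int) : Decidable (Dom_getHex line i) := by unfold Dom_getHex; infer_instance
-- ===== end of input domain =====

-- B replaces A's char-by-char accumulation loop with a loop-free lstrip on an 8-char
-- slice plus a single slice of the token (idiomatic; same cost — the scan is capped at 8).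

-- ===== PORT A =====
def pyIsHexNum (c : Char) : Bool :=
  if !(PySem.Chars.isalnum c || PySem.Chars.isdigit c) then false
  else
    let n := c.toNat
    (48 ≤ n && n ≤ 57) || (65 ≤ n && n ≤ 70) || (97 ≤ n && n ≤ 102)

-- the `for j in range(8)` loop; `none` from pyGet? is Python's IndexError (outside Pre_getHex)
def getHexLoop (cs : List Char) (i : Int) : List Nat → List Char → Int → List Char × Int
  | [], hex, index => (hex, index)
  | j :: js, hex, index =>
      if i + j + 2 ≥ cs.length then (hex, index)
      else
        match PySem.List.pyGet? cs (i + j + 2) with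
        | none => (hex, index)
        | some c =>
          if pyIsHexNum c then getHexLoop cs i js (hex ++ [c]) (index + 1)
          else (hex, index)

def getHex (line : String) (i : Int) : String × Int :=
  let cs := line.toList
  let hex := PySem.List.slice cs (some i) (some (i + 2))
  let r := getHexLoop cs i (List.range 8) hex (i + 2)
  (String.ofList r.1, r.2)

-- ===== PORT B =====
-- s.lstrip(chars) with an explicit chars argument (PySem has no chars-argument lstrip):
-- exact — Python drops exactly the leading characters that occur in `chars`.
def lstripWith (cs : List Char) (chars : List Char) : List Char :=
  cs.dropWhile (fun c => chars.contains c)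

def hexCharList : List Char := "0123456789abcdefABCDEF".toList

def getHex_alt (line : String) (i : Int) : String × Int :=
  let cs := line.toList
  let chunk := PySem.List.slice cs (some (i + 2)) (some (i + 10))
  let count : Int := (chunk.length : Int) - ((lstripWith chunk hexCharList).length : Int)
  let endIdx := i + 2 + count
  (String.ofList (PySem.List.slice cs (some i) (some endIdx)), endIdx)

-- ===== PRECONDITION & SPEC =====
-- Pre_ excludes negative i: there A's behaviour is an accident of Python's negative-index
-- wraparound in `line[i:i+2]` / `line[i+j+2]` (and A raises IndexError when i < -len(line)-2).
def Pre_getHex (line : String) (i : Int) : Prop := 0 ≤ i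
instance (line : String) (i : Int) : Decidable (Pre_getHex line i) := by unfold Pre_getHex; infer_instance
def pvWitness_getHex : String × Int := ("1A2b!", 0)

def Spec_getHex (line : String) (i : Int) (out : String × Int) : Prop := out = getHex_alt line i
instance (line : String) (i : Int) (out : String × Int) : Decidable (Spec_getHex line i out) := by unfold Spec_getHex; infer_instance

-- ===== CLAIM (what is proved, stated in full; the proofs are below) =====
def Claim_equal_getHex : Prop := ∀ (line : String) (i : Int), Dom_getHex line i → Pre_getHex line i → Spec_getHex line i (getHex line i)

-- ===== LEMMAS AND PROOFS =====

-- On domain characters, membership in B's hex-digit string agrees with A's isHexNum test.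
lemma hex_pred_eq (c : Char) (h : pvDomChar c = true) :
    hexCharList.contains c = pyIsHexNum c := by
  have hc : Char.ofNat c.toNat = c := Char.ofNat_toNat c
  simp only [pvDomChar, Bool.or_eq_true, Bool.and_eq_true, decide_eq_true_eq, beq_iff_eq] at h
  have hb : c.toNat ≤ 126 := by omega
  set n := c.toNat with hn
  rw [← hc]
  interval_cases n <;> decide

lemma takeWhile_congr_dom (l : List Char) (h : ∀ c ∈ l, pvDomChar c = true) :
    l.takeWhile (fun c => hexCharList.contains c) = l.takeWhile pyIsHexNum := by
  induction l with
  | nil => rfl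
  | cons c cs ih =>
      simp only [List.takeWhile_cons, hex_pred_eq c (h c (List.mem_cons_self))]
      split
      · rw [ih (fun d hd => h d (List.mem_cons_of_mem _ hd))]
      · rfl

-- A's loop appends exactly the hex-digit prefix of the next `m` characters.
lemma getHexLoop_eq (cs : List Char) (n : Nat) :
    ∀ (m j : Nat) (hex : List Char) (idx : Int),
      getHexLoop cs (n : Int) (List.range' j m 1) hex idx =
        (hex ++ ((cs.drop (n + 2 + j)).take m).takeWhile pyIsHexNum,
         idx + (((cs.drop (n + 2 + j)).take m).takeWhile pyIsHexNum).length) := by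
  intro m
  induction m with
  | zero => intro j hex idx; simp [getHexLoop]
  | succ m ih =>
      intro j hex idx
      rw [List.range'_succ]
      show getHexLoop cs (n : Int) (j :: List.range' (j + 1) m 1) hex idx = _
      by_cases hlen : n + 2 + j < cs.length
      · have hguard : ¬ ((n : Int) + (j : Int) + 2 ≥ (cs.length : Int)) := by
          push_cast; omega
        have hcast : (n : Int) + (j : Int) + 2 = ((n + 2 + j : Nat) : Int) := by push_cast; ring
        have hget : PySem.List.pyGet? cs ((n : Int) + (j : Int) + 2) = some cs[n + 2 + j] := by
          rw [hcast, PySem.List.pyGet?_natCast, List.getElem?_eq_getElem hlen]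
        have hdrop : cs.drop (n + 2 + j) = cs[n + 2 + j] :: cs.drop (n + 2 + j + 1) :=
          List.drop_eq_getElem_cons hlen
        rw [getHexLoop, if_neg hguard, hget]
        by_cases hp : pyIsHexNum cs[n + 2 + j]
        · simp only [hp, if_true]
          rw [ih (j + 1) (hex ++ [cs[n + 2 + j]]) (idx + 1)]
          have harr : n + 2 + (j + 1) = n + 2 + j + 1 := by omega
          rw [harr, hdrop, List.take_succ_cons, List.takeWhile_cons_of_pos hp, Prod.mk.injEq]
          constructor
          · simp [List.append_assoc]
          · simp only [List.length_cons]; push_cast; omega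
        · simp only [hp]
          rw [hdrop, List.take_succ_cons, List.takeWhile_cons_of_neg (by simp [hp])]
          simp
      · have hguard : (n : Int) + (j : Int) + 2 ≥ (cs.length : Int) := by omega
        rw [getHexLoop, if_pos hguard]
        rw [List.drop_eq_nil_of_le (by omega)]
        simp

-- ===== VERDICT (by name: the statement is the Claim_ definition above) =====
theorem getHex_spec : Claim_equal_getHex := by
  intro line i hdom hpre
  unfold Spec_getHex
  obtain ⟨n, rfl⟩ : ∃ n : Nat, i = (n : Int) := ⟨i.toNat, (Int.toNat_of_nonneg hpre).symm⟩
  simp only [getHex, getHex_alt]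
  set cs := line.toList with hcs
  have hdom' := hdom
  simp only [Dom_getHex, Bool.and_eq_true] at hdom'
  have hdomall : ∀ c ∈ cs, pvDomChar c = true := by
    have := hdom'.1
    simpa [pvDomStr, List.all_eq_true, hcs] using this
  have hchunk : PySem.List.slice cs (some ((n : Int) + 2)) (some ((n : Int) + 10)) =
      (cs.drop (n + 2)).take 8 := by
    have h2 : (n : Int) + 2 = ((n + 2 : Nat) : Int) := by push_cast; ring
    have h10 : (n : Int) + 10 = ((n + 10 : Nat) : Int) := by push_cast; ring
    rw [h2, h10, PySem.List.slice_natCast]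
    congr 1
    omega
  have hslice2 : PySem.List.slice cs (some (n : Int)) (some ((n : Int) + 2)) = (cs.drop n).take 2 := by
    have h2 : (n : Int) + 2 = ((n + 2 : Nat) : Int) := by push_cast; ring
    rw [h2, PySem.List.slice_natCast]
    congr 1
    omega
  have hcongr : ((cs.drop (n + 2)).take 8).takeWhile (fun c => hexCharList.contains c) =
      ((cs.drop (n + 2)).take 8).takeWhile pyIsHexNum :=
    takeWhile_congr_dom _ (fun c hc => hdomall c (List.mem_of_mem_drop (List.mem_of_mem_take hc)))
  have hcount : ((((cs.drop (n + 2)).take 8).length : Int) -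
      ((lstripWith ((cs.drop (n + 2)).take 8) hexCharList).length : Int)) =
      (((((cs.drop (n + 2)).take 8).takeWhile pyIsHexNum).length : Nat) : Int) := by
    have hsplit := congrArg List.length
      (List.takeWhile_append_dropWhile (p := fun c => hexCharList.contains c)
        (l := (cs.drop (n + 2)).take 8))
    rw [List.length_append, hcongr] at hsplit
    simp only [lstripWith]
    omega
  have hstr : (cs.drop n).take 2 ++ ((cs.drop (n + 2)).take 8).takeWhile pyIsHexNum =
      (cs.drop n).take (2 + (((cs.drop (n + 2)).take 8).takeWhile pyIsHexNum).length) := by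
    have hpre2 : ((cs.drop (n + 2)).take 8).takeWhile pyIsHexNum <+: (cs.drop n).drop 2 := by
      have h1 : ((cs.drop (n + 2)).take 8).takeWhile pyIsHexNum <+: (cs.drop (n + 2)).take 8 :=
        List.takeWhile_prefix _
      have h2 : (cs.drop (n + 2)).take 8 <+: cs.drop (n + 2) := List.take_prefix _ _
      have h3 : cs.drop (n + 2) = (cs.drop n).drop 2 := by
        rw [List.drop_drop]
      exact h3 ▸ h1.trans h2
    rw [List.take_add, ← List.prefix_iff_eq_take.1 hpre2]
  have hsliceB : PySem.List.slice cs (some (n : Int))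
      (some ((n : Int) + 2 + ((((cs.drop (n + 2)).take 8).takeWhile pyIsHexNum).length : Int))) =
      (cs.drop n).take (2 + (((cs.drop (n + 2)).take 8).takeWhile pyIsHexNum).length) := by
    have h2 : (n : Int) + 2 + ((((cs.drop (n + 2)).take 8).takeWhile pyIsHexNum).length : Int) =
        ((n + (2 + (((cs.drop (n + 2)).take 8).takeWhile pyIsHexNum).length) : Nat) : Int) := by
      push_cast; ring
    rw [h2, PySem.List.slice_natCast]
    congr 1
    omega
  rw [List.range_eq_range', getHexLoop_eq cs n 8 0, hchunk, hcount, hslice2]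
  have hz : n + 2 + 0 = n + 2 := by omega
  rw [hz, hsliceB, hstr]
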